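-- pv_equiv track=rewrite | github.com/Thinksky5124/SVTAS | svtas/utils/sbp/map_func.py | repermute_sample_info
-- ===== SOURCE A (Python) =====
-- from typing import Any, List, Dict, Tuple
--
-- def repermute_sample_info(permute_dims: List[int], sample_dims: List[int], keep_ratio_list: List[int], sample_index_list: List[List[int]],):
--     permute_sample_dims = []
--     permute_keep_ratio_list = []
--     permute_sample_index_list = []
--     for permute_idx, dim in enumerate(permute_dims):
--         for key_index, sample_dim in enumerate(sample_dims):
--             if dim == sample_dim:
--                 permute_sample_dims.append(permute_idx)
--                 permute_keep_ratio_list.append(keep_ratio_list[key_index])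
--                 permute_sample_index_list.append(sample_index_list[key_index])
--
--     return permute_sample_dims, permute_keep_ratio_list, permute_sample_index_list
-- ===== SOURCE B (Python) =====
-- def repermute_sample_info(permute_dims, sample_dims, keep_ratio_list, sample_index_list):
--     # Stage 1: multi-index table, dim value -> ordered positions in sample_dims.
--     index = {}
--     for key_index, sample_dim in enumerate(sample_dims):
--         index.setdefault(sample_dim, []).append(key_index)
--     # Stage 2: flat list of (permute_idx, key_index) matches via index lookup.
--     pairs = [(permute_idx, key_index)
--              for permute_idx, dim in enumerate(permute_dims)
--              for key_index in index.get(dim, [])]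
--     # Stage 3: three projections of the match list.
--     return ([p for p, _ in pairs],
--             [keep_ratio_list[k] for _, k in pairs],
--             [sample_index_list[k] for _, k in pairs])
-- ===== Notes on version B (the rewrite author's own statement) =====
-- stated objective: faster
-- what changed: B first builds a dict multi-index from dim value to its ordered positions in sample_dims, then materialises the flat (permute_idx, key_index) match list by index lookup and derives the three outputs as three projections of it, instead of A's nested scan appending to three accumulators.
import Mathlib
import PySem

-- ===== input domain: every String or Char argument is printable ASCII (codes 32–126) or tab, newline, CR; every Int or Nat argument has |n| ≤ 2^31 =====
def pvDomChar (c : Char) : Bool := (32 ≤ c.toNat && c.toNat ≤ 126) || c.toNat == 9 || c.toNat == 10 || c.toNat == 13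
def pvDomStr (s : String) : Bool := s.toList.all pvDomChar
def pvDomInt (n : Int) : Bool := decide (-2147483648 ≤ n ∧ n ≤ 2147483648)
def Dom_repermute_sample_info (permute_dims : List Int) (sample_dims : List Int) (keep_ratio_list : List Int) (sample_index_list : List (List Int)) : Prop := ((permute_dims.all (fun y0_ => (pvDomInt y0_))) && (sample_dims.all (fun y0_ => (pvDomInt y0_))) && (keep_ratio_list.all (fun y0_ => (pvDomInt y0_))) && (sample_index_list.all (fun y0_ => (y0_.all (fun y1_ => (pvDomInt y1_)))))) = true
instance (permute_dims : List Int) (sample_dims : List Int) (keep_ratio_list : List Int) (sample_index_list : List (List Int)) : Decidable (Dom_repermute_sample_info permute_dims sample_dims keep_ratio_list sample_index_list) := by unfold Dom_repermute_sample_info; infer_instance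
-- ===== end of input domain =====

-- B builds a dict multi-index (dim value -> its positions in sample_dims) once, then
-- materialises the flat (permute_idx, key_index) match list by lookup and returns its three
-- projections; objective: faster (asymptotic).

-- ===== PORT A =====
-- Literal port of A: nested loops over enumerate(permute_dims) / enumerate(sample_dims),
-- appending to three accumulators. keep_ratio_list[key_index] / sample_index_list[key_index]
-- are in range under Pre_ (pyGetD is exact there).
def repermute_sample_info (permute_dims : List Int) (sample_dims : List Int) (keep_ratio_list : List Int) (sample_index_list : List (List Int)) : List Int × List Int × List (List Int) :=
  (PySem.List.enumerate permute_dims).foldl (fun acc p =>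
    (PySem.List.enumerate sample_dims).foldl (fun acc2 q =>
      if p.2 == q.2 then
        (acc2.1 ++ [p.1],
         acc2.2.1 ++ [PySem.List.pyGetD keep_ratio_list q.1 0],
         acc2.2.2 ++ [PySem.List.pyGetD sample_index_list q.1 []])
      else acc2) acc) ([], [], [])

-- ===== PORT B =====
-- index.setdefault(sample_dim, []).append(key_index)
def pvBuildIndex (sample_dims : List Int) : PySem.Dict Int (List Int) :=
  (PySem.List.enumerate sample_dims).foldl
    (fun d q => d.insert q.2 (d.getD q.2 [] ++ [q.1])) PySem.Dict.empty

-- pairs comprehension, then the three projection comprehensions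
def repermute_sample_info_alt (permute_dims : List Int) (sample_dims : List Int) (keep_ratio_list : List Int) (sample_index_list : List (List Int)) : List Int × List Int × List (List Int) :=
  let index := pvBuildIndex sample_dims
  let pairs := (PySem.List.enumerate permute_dims).flatMap
    (fun p => (index.getD p.2 []).map (fun k => (p.1, k)))
  (pairs.map (fun q => q.1),
   pairs.map (fun q => PySem.List.pyGetD keep_ratio_list q.2 0),
   pairs.map (fun q => PySem.List.pyGetD sample_index_list q.2 []))

-- ===== PRECONDITION & SPEC =====
-- Pre_ excludes exactly the inputs where A raises IndexError: a sample_dims position that is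
-- matched by some permute dim but is out of range of keep_ratio_list or sample_index_list.
def Pre_repermute_sample_info (permute_dims : List Int) (sample_dims : List Int) (keep_ratio_list : List Int) (sample_index_list : List (List Int)) : Prop :=
  ∀ k, (h : k < sample_dims.length) → sample_dims[k] ∈ permute_dims →
    k < keep_ratio_list.length ∧ k < sample_index_list.length
instance (permute_dims : List Int) (sample_dims : List Int) (keep_ratio_list : List Int) (sample_index_list : List (List Int)) : Decidable (Pre_repermute_sample_info permute_dims sample_dims keep_ratio_list sample_index_list) := by unfold Pre_repermute_sample_info; infer_instance
def pvWitness_repermute_sample_info : List Int × List Int × List Int × List (List Int) :=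
  ([1, 0], [0, 1], [5, 6], [[1], [2]])

def Spec_repermute_sample_info (permute_dims : List Int) (sample_dims : List Int) (keep_ratio_list : List Int) (sample_index_list : List (List Int)) (out : List Int × List Int × List (List Int)) : Prop := out = repermute_sample_info_alt permute_dims sample_dims keep_ratio_list sample_index_list
instance (permute_dims : List Int) (sample_dims : List Int) (keep_ratio_list : List Int) (sample_index_list : List (List Int)) (out : List Int × List Int × List (List Int)) : Decidable (Spec_repermute_sample_info permute_dims sample_dims keep_ratio_list sample_index_list out) := by unfold Spec_repermute_sample_info; infer_instance

-- ===== CLAIM (what is proved, stated in full; the proofs are below) =====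
def Claim_equal_repermute_sample_info : Prop := ∀ (permute_dims : List Int) (sample_dims : List Int) (keep_ratio_list : List Int) (sample_index_list : List (List Int)), Dom_repermute_sample_info permute_dims sample_dims keep_ratio_list sample_index_list → Pre_repermute_sample_info permute_dims sample_dims keep_ratio_list sample_index_list → Spec_repermute_sample_info permute_dims sample_dims keep_ratio_list sample_index_list (repermute_sample_info permute_dims sample_dims keep_ratio_list sample_index_list)

-- ===== LEMMAS AND PROOFS =====

-- Generic: A's inner guarded fold appending one element per match is three maps over the
-- filtered list.
theorem pv_foldl_inner {α : Type} (l : List α) (p : α → Bool) (c : Int) (f : α → Int)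
    (g : α → List Int) (acc : List Int × List Int × List (List Int)) :
    l.foldl (fun a x => if p x then (a.1 ++ [c], a.2.1 ++ [f x], a.2.2 ++ [g x]) else a) acc
      = (acc.1 ++ (l.filter p).map (fun _ => c),
         acc.2.1 ++ (l.filter p).map f,
         acc.2.2 ++ (l.filter p).map g) := by
  induction l generalizing acc with
  | nil => simp
  | cons x xs ih =>
    by_cases h : p x
    · simp [List.foldl_cons, h, ih]
    · simp [List.foldl_cons, h, ih]

-- Generic: an outer fold appending three blocks per element is three flatMaps.
theorem pv_foldl_outer {α : Type} (l : List α) (f g : α → List Int) (h : α → List (List Int))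
    (acc : List Int × List Int × List (List Int)) :
    l.foldl (fun a x => (a.1 ++ f x, a.2.1 ++ g x, a.2.2 ++ h x)) acc
      = (acc.1 ++ l.flatMap f, acc.2.1 ++ l.flatMap g, acc.2.2 ++ l.flatMap h) := by
  induction l generalizing acc with
  | nil => simp
  | cons x xs ih => simp [List.foldl_cons, ih]

-- The multi-index characterisation: looking up k yields the positions of k, in order.
theorem pv_index_getD (l : List (Int × Int)) (d : PySem.Dict Int (List Int)) (k : Int) :
    (l.foldl (fun d q => d.insert q.2 (d.getD q.2 [] ++ [q.1])) d).getD k []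
      = d.getD k [] ++ ((l.filter (fun q => q.2 == k)).map (·.1)) := by
  induction l generalizing d with
  | nil => simp
  | cons q qs ih =>
    rw [List.foldl_cons, ih, List.filter_cons]
    by_cases h : q.2 = k
    · simp [h]
    · simp [PySem.Dict.getD_insert, Ne.symm h, h]

theorem pvBuildIndex_getD (sample_dims : List Int) (k : Int) :
    (pvBuildIndex sample_dims).getD k []
      = ((PySem.List.enumerate sample_dims).filter (fun q => q.2 == k)).map (·.1) := by
  rw [pvBuildIndex, pv_index_getD]
  simp [PySem.Dict.getD_empty]

theorem repermute_sample_info_spec : Claim_equal_repermute_sample_info := by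
  intro pd sd kr si _ _
  unfold Spec_repermute_sample_info repermute_sample_info repermute_sample_info_alt
  -- A's outer fold, with each inner fold rewritten to three-block appends
  have hA : (PySem.List.enumerate pd).foldl (fun acc p =>
      (PySem.List.enumerate sd).foldl (fun acc2 q =>
        if p.2 == q.2 then
          (acc2.1 ++ [p.1],
           acc2.2.1 ++ [PySem.List.pyGetD kr q.1 0],
           acc2.2.2 ++ [PySem.List.pyGetD si q.1 []])
        else acc2) acc) (([], [], []) : List Int × List Int × List (List Int))
    = (PySem.List.enumerate pd).foldl (fun acc p =>
        (acc.1 ++ (((PySem.List.enumerate sd).filter (fun q => p.2 == q.2)).map (fun _ => p.1)),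
         acc.2.1 ++ (((PySem.List.enumerate sd).filter (fun q => p.2 == q.2)).map
            (fun q => PySem.List.pyGetD kr q.1 0)),
         acc.2.2 ++ (((PySem.List.enumerate sd).filter (fun q => p.2 == q.2)).map
            (fun q => PySem.List.pyGetD si q.1 [])))) ([], [], []) := by
    refine congrFun (congrFun (congrArg List.foldl (funext fun acc => funext fun p => ?_)) _) _
    exact pv_foldl_inner _ _ _ _ _ _
  rw [hA, pv_foldl_outer]
  have hfil : ∀ p : Int × Int, (PySem.List.enumerate sd).filter (fun q => p.2 == q.2)
      = (PySem.List.enumerate sd).filter (fun q => q.2 == p.2) := by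
    intro p; apply List.filter_congr; intro q _
    by_cases h : p.2 = q.2 <;> simp [h, Ne.symm]
  simp only [List.map_flatMap, pvBuildIndex_getD, hfil, List.map_map, Function.comp_def,
    List.nil_append]
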